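-- pv_equiv track=rewrite | github.com/VITAMIN-organisation/vitamin-model-checker | model_checker/parsers/formulas/NatSL/conversion.py | _build_existential_natatl_formula
-- ===== SOURCE A (Python) =====
-- def _build_existential_natatl_formula(
--     existential_vars, var_to_agent, temporal_operator, proposition
-- ):
--     """Build the single merged existential NatATL formula in canonical NatATL format."""
--     if not existential_vars:
--         return None
--     coalition = [
--         var_to_agent[var] for _, var, _ in existential_vars if var in var_to_agent
--     ]
--     coalition_str = ",".join(map(str, coalition))
--     bounds = [bound for _, var, bound in existential_vars if var in var_to_agent]
--     k = max(bounds) if bounds else 1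
--     return f"<{{{coalition_str}}}, {k}>{temporal_operator}{proposition}"
-- ===== SOURCE B (Python) =====
-- def _build_existential_natatl_formula(
--     existential_vars, var_to_agent, temporal_operator, proposition
-- ):
--     """Build the single merged existential NatATL formula in canonical NatATL format."""
--     if not existential_vars:
--         return None
--     coalition_str = None
--     k = None
--     for _, var, bound in reversed(existential_vars):
--         if var in var_to_agent:
--             agent = str(var_to_agent[var])
--             coalition_str = agent if coalition_str is None else agent + "," + coalition_str
--             k = bound if k is None else max(bound, k)
--     if coalition_str is None:
--         coalition_str = ""
--     if k is None:
--         k = 1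
--     return f"<{{{coalition_str}}}, {k}>{temporal_operator}{proposition}"
-- ===== Notes on version B (the rewrite author's own statement) =====
-- stated objective: alternative
-- what changed: Instead of two filtered list comprehensions followed by join() and max(), B makes one reversed pass that builds the comma-joined coalition string back-to-front and a running maximum bound directly, with no intermediate lists and no join()/max() calls.
import Mathlib
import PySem

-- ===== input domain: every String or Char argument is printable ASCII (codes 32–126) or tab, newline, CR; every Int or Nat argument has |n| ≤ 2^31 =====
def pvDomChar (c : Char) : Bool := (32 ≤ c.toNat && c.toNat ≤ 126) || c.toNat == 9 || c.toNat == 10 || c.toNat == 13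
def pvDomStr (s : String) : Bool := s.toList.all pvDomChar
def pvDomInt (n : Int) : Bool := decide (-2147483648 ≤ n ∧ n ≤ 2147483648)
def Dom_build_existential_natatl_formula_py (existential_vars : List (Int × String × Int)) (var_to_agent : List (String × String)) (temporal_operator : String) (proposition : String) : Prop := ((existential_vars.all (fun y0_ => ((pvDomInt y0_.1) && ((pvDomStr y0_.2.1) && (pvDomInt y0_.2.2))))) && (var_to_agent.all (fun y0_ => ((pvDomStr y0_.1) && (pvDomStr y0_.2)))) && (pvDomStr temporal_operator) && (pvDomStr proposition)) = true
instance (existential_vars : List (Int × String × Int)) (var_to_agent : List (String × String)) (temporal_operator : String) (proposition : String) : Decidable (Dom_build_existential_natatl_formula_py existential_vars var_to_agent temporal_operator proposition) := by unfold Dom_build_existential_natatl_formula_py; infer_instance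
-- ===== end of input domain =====

-- B replaces A's two filtered comprehensions + join() + max() by one reversed pass
-- building the joined coalition string back-to-front with a running maximum bound.

-- ===== PORT A =====
def build_existential_natatl_formula_py (existential_vars : List (Int × String × Int)) (var_to_agent : List (String × String)) (temporal_operator : String) (proposition : String) : Option String :=
  if existential_vars.isEmpty then none
  else
    -- [var_to_agent[var] for _, var, _ in existential_vars if var in var_to_agent]
    let coalition : List String :=
      existential_vars.filterMap (fun t => PySem.Dict.get? (PySem.Dict.mk var_to_agent) t.2.1)
    -- ",".join(map(str, coalition))  (str on a str is the identity)
    let coalition_str : String := PySem.Str.join "," coalition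
    -- [bound for _, var, bound in existential_vars if var in var_to_agent]
    let bounds : List Int :=
      (existential_vars.filter (fun t => (PySem.Dict.get? (PySem.Dict.mk var_to_agent) t.2.1).isSome)).map
        (fun t => t.2.2)
    -- k = max(bounds) if bounds else 1
    let k : Int :=
      match PySem.List.max? bounds (fun x => x) with
      | some m => m
      | none => 1
    some ("<{" ++ coalition_str ++ "}, " ++ PySem.Int.toStr k ++ ">" ++ temporal_operator ++ proposition)

-- ===== PORT B =====
-- one step of B's loop body: state = (coalition_str : Option String, k : Option Int)
def pvBStep (var_to_agent : List (String × String)) (st : Option String × Option Int)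
    (t : Int × String × Int) : Option String × Option Int :=
  match PySem.Dict.get? (PySem.Dict.mk var_to_agent) t.2.1 with
  | some agent =>
      (some (match st.1 with | none => agent | some s => agent ++ "," ++ s),
       some (match st.2 with | none => t.2.2 | some k => max t.2.2 k))
  | none => st

def build_existential_natatl_formula_py_alt (existential_vars : List (Int × String × Int)) (var_to_agent : List (String × String)) (temporal_operator : String) (proposition : String) : Option String :=
  if existential_vars.isEmpty then none
  else
    -- for _, var, bound in reversed(existential_vars): …
    let st := existential_vars.reverse.foldl (pvBStep var_to_agent) (none, none)
    let coalition_str : String := st.1.getD ""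
    let k : Int := st.2.getD 1
    some ("<{" ++ coalition_str ++ "}, " ++ PySem.Int.toStr k ++ ">" ++ temporal_operator ++ proposition)

-- ===== PRECONDITION & SPEC =====
def Spec_build_existential_natatl_formula_py (existential_vars : List (Int × String × Int)) (var_to_agent : List (String × String)) (temporal_operator : String) (proposition : String) (out : Option String) : Prop := out = build_existential_natatl_formula_py_alt existential_vars var_to_agent temporal_operator proposition
instance (existential_vars : List (Int × String × Int)) (var_to_agent : List (String × String)) (temporal_operator : String) (proposition : String) (out : Option String) : Decidable (Spec_build_existential_natatl_formula_py existential_vars var_to_agent temporal_operator proposition out) := by unfold Spec_build_existential_natatl_formula_py; infer_instance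

-- ===== CLAIM (what is proved, stated in full; the proofs are below) =====
def Claim_equal_build_existential_natatl_formula_py : Prop := ∀ (existential_vars : List (Int × String × Int)) (var_to_agent : List (String × String)) (temporal_operator : String) (proposition : String), Dom_build_existential_natatl_formula_py existential_vars var_to_agent temporal_operator proposition → Spec_build_existential_natatl_formula_py existential_vars var_to_agent temporal_operator proposition (build_existential_natatl_formula_py existential_vars var_to_agent temporal_operator proposition)

-- ===== LEMMAS AND PROOFS =====

-- foldl max absorbs an extra operand on the left
lemma pvFoldlMax_pull (t : List Int) : ∀ (b c : Int),
    t.foldl max (max b c) = max b (t.foldl max c) := by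
  induction t with
  | nil => intro b c; simp
  | cons x t ih =>
    intro b c
    simp only [List.foldl_cons]
    rw [max_assoc, ih]

-- Str.join on singleton / cons
lemma pvJoin_singleton (a : String) : PySem.Str.join "," [a] = a := by
  apply String.toList_injective
  simp [PySem.Str.join, PySem.Chars.join_singleton]

lemma pvJoin_cons (a b : String) (rest : List String) :
    PySem.Str.join "," (a :: b :: rest) = a ++ "," ++ PySem.Str.join "," (b :: rest) := by
  apply String.toList_injective
  simp [PySem.Str.join, PySem.Chars.join_cons_cons]

-- B's right-to-left fold computed in terms of A's two comprehensions
lemma pvFold_char (v : List (String × String)) : ∀ (l : List (Int × String × Int)),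
    l.reverse.foldl (pvBStep v) (none, none) =
      ((match l.filterMap (fun t => PySem.Dict.get? (PySem.Dict.mk v) t.2.1) with
        | [] => none
        | c => some (PySem.Str.join "," c)),
       PySem.List.max?
         ((l.filter (fun t => (PySem.Dict.get? (PySem.Dict.mk v) t.2.1).isSome)).map (fun t => t.2.2))
         (fun x => x)) := by
  intro l
  induction l with
  | nil => simp [PySem.List.max?]
  | cons h t ih =>
    rw [List.reverse_cons, List.foldl_append, ih]
    simp only [List.foldl_cons, List.foldl_nil, pvBStep]
    cases hg : PySem.Dict.get? (PySem.Dict.mk v) h.2.1 with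
    | none => simp [hg]
    | some a =>
      simp only [hg, List.filterMap_cons, List.filter_cons, Option.isSome_some, if_pos,
        List.map_cons]
      cases hcc : t.filterMap (fun t => PySem.Dict.get? (PySem.Dict.mk v) t.2.1) with
      | nil =>
        have hbb : t.filter (fun t => (PySem.Dict.get? (PySem.Dict.mk v) t.2.1).isSome) = [] := by
          rw [List.filter_eq_nil_iff]
          intro x hx
          have := List.filterMap_eq_nil_iff.mp hcc x hx
          simp [this]
        simp [hbb, pvJoin_singleton, PySem.List.max?]
      | cons b rest =>
        have hbb : t.filter (fun t => (PySem.Dict.get? (PySem.Dict.mk v) t.2.1).isSome) ≠ [] := by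
          intro hnil
          have : t.filterMap (fun t => PySem.Dict.get? (PySem.Dict.mk v) t.2.1) = [] := by
            rw [List.filterMap_eq_nil_iff]
            intro x hx
            have hx2 := List.filter_eq_nil_iff.mp hnil x hx
            simpa using hx2
          rw [hcc] at this
          exact (List.cons_ne_nil _ _) this
        obtain ⟨c, t', hmap⟩ :=
          List.exists_cons_of_ne_nil (by simpa using hbb :
            (t.filter (fun t => (PySem.Dict.get? (PySem.Dict.mk v) t.2.1).isSome)).map (fun t => t.2.2) ≠ [])
        rw [hmap]
        simp [pvJoin_cons, PySem.List.max?_id_cons, List.foldl_cons, pvFoldlMax_pull]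

-- ===== VERDICT (by name: the statement is the Claim_ definition above) =====
theorem build_existential_natatl_formula_py_spec : Claim_equal_build_existential_natatl_formula_py := by
  intro ev v top prop _
  unfold Spec_build_existential_natatl_formula_py
  unfold build_existential_natatl_formula_py build_existential_natatl_formula_py_alt
  by_cases he : ev.isEmpty
  · simp [he]
  · have hget : ∀ (o : Option Int), (match o with | some x => x | none => 1) = o.getD 1 := by
      intro o; cases o <;> rfl
    simp only [he, if_neg, Bool.false_eq_true, not_false_iff]
    rw [pvFold_char v ev]
    cases hc : ev.filterMap (fun t => PySem.Dict.get? (PySem.Dict.mk v) t.2.1) with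
    | nil =>
      have hjoin : PySem.Str.join "," ([] : List String) = "" := by decide
      simp [hjoin, hget]
    | cons a r => simp [hget]
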